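-- pv_equiv track=rewrite | github.com/AdamZhouSE/pythonHomework | Code/CodeRecords/2222/60764/253809.py | breatIntoIt
-- ===== SOURCE A (Python) =====
-- def breatIntoIt(s):
--     res=[]
--     r=""
--     for i in range(len(s)):
--         if s[i]=='+' or s[i]=='-':
--             if len(r)>0:
--                 res.append(r)
--             r=""+s[i]
--         else:
--             r+=s[i]
--     res.append(r)
--     return res
-- ===== SOURCE B (Python) =====
-- def breatIntoIt(s):
--     # Single right-to-left pass building the token list back-to-front.
--     tokens = [""]
--     for c in reversed(s):
--         tokens[0] = c + tokens[0]
--         if c == '+' or c == '-':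
--             tokens.insert(0, "")
--     if tokens[0] == "" and len(tokens) > 1:
--         tokens.pop(0)
--     return tokens
-- ===== Notes on version B (the rewrite author's own statement) =====
-- stated objective: alternative
-- what changed: B replaces A's left-to-right accumulate-and-flush loop by a single right-to-left pass that builds the token list back-to-front (starting a fresh token after each sign) and drops the empty leading token once at the end.
import Mathlib
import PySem

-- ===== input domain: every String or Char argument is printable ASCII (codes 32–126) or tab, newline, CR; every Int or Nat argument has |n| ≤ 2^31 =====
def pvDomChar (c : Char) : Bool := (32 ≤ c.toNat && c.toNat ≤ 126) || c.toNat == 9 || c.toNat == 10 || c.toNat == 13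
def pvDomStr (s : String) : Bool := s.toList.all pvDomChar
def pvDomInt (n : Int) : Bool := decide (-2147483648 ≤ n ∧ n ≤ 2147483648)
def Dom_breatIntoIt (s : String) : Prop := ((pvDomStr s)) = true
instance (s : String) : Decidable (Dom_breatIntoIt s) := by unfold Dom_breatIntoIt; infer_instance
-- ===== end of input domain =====

-- B builds the token list back-to-front in one right-to-left pass instead of A's flush-accumulator loop (alternative decomposition, same cost class).


-- ===== PORT A =====
-- A's loop: state (res, r); on a sign, flush r (if nonempty) and restart r with the sign; else extend r.
-- Strings are handled as List Char and rebuilt with String.mk at the end (exact for Python string concatenation).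
def breatIntoItGo (acc : List (List Char) × List Char) (c : Char) : List (List Char) × List Char :=
  if c = '+' ∨ c = '-' then
    ((if acc.2.length > 0 then acc.1 ++ [acc.2] else acc.1), [c])
  else
    (acc.1, acc.2 ++ [c])

def breatIntoItCore (cs : List Char) : List (List Char) :=
  let p := cs.foldl breatIntoItGo ([], [])
  p.1 ++ [p.2]

def breatIntoIt (s : String) : List String :=
  (breatIntoItCore s.toList).map String.ofList

-- ===== PORT B =====
-- B's loop body: prepend c to the first (open) token; after a sign, open a fresh empty token in front.
def breatIntoItAltStep (c : Char) (ts : List (List Char)) : List (List Char) :=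
  match ts with
  | [] => []
  | t :: rest =>
    if c = '+' ∨ c = '-' then [] :: (c :: t) :: rest else (c :: t) :: rest

def breatIntoItAltCore (cs : List Char) : List (List Char) :=
  let ts := cs.foldr breatIntoItAltStep [[]]
  match ts with
  | [] :: r :: rest => r :: rest
  | ts => ts

def breatIntoIt_alt (s : String) : List String :=
  (breatIntoItAltCore s.toList).map String.ofList

-- ===== PRECONDITION & SPEC =====
def Spec_breatIntoIt (s : String) (out : List String) : Prop := out = breatIntoIt_alt s
instance (s : String) (out : List String) : Decidable (Spec_breatIntoIt s out) := by unfold Spec_breatIntoIt; infer_instance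

-- ===== CLAIM (what is proved, stated in full; the proofs are below) =====
def Claim_equal_breatIntoIt : Prop := ∀ (s : String), Dom_breatIntoIt s → Spec_breatIntoIt s (breatIntoIt s)

-- ===== LEMMAS AND PROOFS =====

-- Joining A's open accumulator r with B's token list: if r together with the open head is empty
-- (string starts with a sign), the empty leading token is dropped.
def pvCombine (r : List Char) (ts : List (List Char)) : List (List Char) :=
  match ts with
  | [] => [r]
  | t :: rest => if r ++ t = [] ∧ rest ≠ [] then rest else (r ++ t) :: rest

theorem pvFoldrNe (cs : List Char) : cs.foldr breatIntoItAltStep [[]] ≠ [] := by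
  induction cs with
  | nil => simp
  | cons c cs ih =>
    simp only [List.foldr]
    cases h : cs.foldr breatIntoItAltStep [[]] with
    | nil => exact absurd h ih
    | cons t rest =>
      simp only [breatIntoItAltStep]
      split <;> simp

theorem pvLoopEq (cs : List Char) (res : List (List Char)) (r : List Char) :
    (cs.foldl breatIntoItGo (res, r)).1 ++ [(cs.foldl breatIntoItGo (res, r)).2]
      = res ++ pvCombine r (cs.foldr breatIntoItAltStep [[]]) := by
  induction cs generalizing res r with
  | nil => simp [pvCombine]
  | cons c cs ih =>
    simp only [List.foldl, List.foldr]
    cases h : cs.foldr breatIntoItAltStep [[]] with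
    | nil => exact absurd h (pvFoldrNe cs)
    | cons t rest =>
      by_cases hc : c = '+' ∨ c = '-'
      · simp only [breatIntoItGo, breatIntoItAltStep, if_pos hc]
        rw [ih, h]
        by_cases hr : r = []
        · subst hr
          simp [pvCombine]
        · have hrlen : r.length > 0 := List.length_pos_of_ne_nil hr
          simp [pvCombine, hrlen, hr, List.append_assoc]
      · simp only [breatIntoItGo, breatIntoItAltStep, if_neg hc]
        rw [ih, h]
        simp [pvCombine, List.append_assoc]


theorem pvCoreEq (cs : List Char) : breatIntoItCore cs = breatIntoItAltCore cs := by
  unfold breatIntoItCore breatIntoItAltCore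
  rw [pvLoopEq]
  cases h : cs.foldr breatIntoItAltStep [[]] with
  | nil => exact absurd h (pvFoldrNe cs)
  | cons t rest =>
    cases t with
    | cons a t' => simp [pvCombine]
    | nil =>
      cases rest with
      | nil => simp [pvCombine]
      | cons r' rest' => simp [pvCombine]

-- ===== VERDICT (by name: the statement is the Claim_ definition above) =====
theorem breatIntoIt_spec : Claim_equal_breatIntoIt := by
  intro s _
  unfold Spec_breatIntoIt breatIntoIt breatIntoIt_alt
  rw [pvCoreEq]
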